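-- pv_equiv track=rewrite | github.com/debojitneogy/python_ | check_num.py | calneon
-- ===== SOURCE A (Python) =====
-- def calneon(num):
--     i = num**2;
--     cnum = 0;
--     while i>0:
--         k = i%10;
--         i = i//10;
--         cnum += k;
--     return (num,cnum);
-- ===== SOURCE B (Python) =====
-- def calneon(num):
--     return (num, sum(int(c) for c in str(num**2)))
-- ===== Notes on version B (the rewrite author's own statement) =====
-- stated objective: idiomatic
-- what changed: B replaces the digit-peeling while-loop (mod/floordiv by ten) with summing the integer values of the characters of the decimal string of the square.
import Mathlib
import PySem

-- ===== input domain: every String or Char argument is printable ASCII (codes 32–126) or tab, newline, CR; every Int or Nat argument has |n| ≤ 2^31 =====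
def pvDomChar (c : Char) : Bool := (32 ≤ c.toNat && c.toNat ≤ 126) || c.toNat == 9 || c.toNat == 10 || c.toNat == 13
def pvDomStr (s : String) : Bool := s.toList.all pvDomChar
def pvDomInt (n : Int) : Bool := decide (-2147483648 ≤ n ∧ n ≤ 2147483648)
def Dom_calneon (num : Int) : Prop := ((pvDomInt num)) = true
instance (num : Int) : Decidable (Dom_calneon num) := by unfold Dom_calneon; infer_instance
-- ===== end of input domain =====

-- B computes the digit sum of num**2 by summing the digit characters of str(num**2)
-- instead of peeling digits with %10 and //10 in a while-loop (idiomatic alternative).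


-- ===== PORT A =====
-- the 'while i > 0' loop, carrying (i, cnum)
def calneonLoop (i cnum : Int) : Int :=
  if 0 < i then
    calneonLoop (PySem.Int.floordiv i 10) (cnum + PySem.Int.mod i 10)
  else cnum
termination_by i.toNat
decreasing_by
  have h1 : PySem.Int.floordiv i 10 = i / 10 :=
    PySem.Int.floordiv_eq_ediv_of_pos (by norm_num)
  rw [h1]; omega

def calneon (num : Int) : Int × Int :=
  (num, calneonLoop (num ^ 2) 0)

-- ===== PORT B =====
-- int(c): exact for the digit characters produced by str(num**2) (Python never raises here)
def calneonCharVal (c : Char) : Int :=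
  (PySem.Int.ofChars? [c]).getD 0

def calneon_alt (num : Int) : Int × Int :=
  (num, ((PySem.Int.toChars (num ^ 2)).map calneonCharVal).sum)

-- ===== PRECONDITION & SPEC =====
def Spec_calneon (num : Int) (out : Int × Int) : Prop := out = calneon_alt num
instance (num : Int) (out : Int × Int) : Decidable (Spec_calneon num out) := by unfold Spec_calneon; infer_instance

-- ===== CLAIM (what is proved, stated in full; the proofs are below) =====
def Claim_equal_calneon : Prop := ∀ (num : Int), Dom_calneon num → Spec_calneon num (calneon num)

-- ===== LEMMAS AND PROOFS =====

-- mathematical digit sum on Nat, the common reference value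
def calneonDigitSum (n : Nat) : Int :=
  if n = 0 then 0 else (n % 10 : Nat) + calneonDigitSum (n / 10)

theorem calneonCharVal_digitChar (d : Nat) (hd : d < 10) :
    calneonCharVal (Nat.digitChar d) = (d : Int) := by
  interval_cases d <;> decide

-- A's loop computes cnum + digit sum
theorem calneonLoop_eq (n : Nat) : ∀ (i cnum : Int), i.toNat = n → 0 ≤ i →
    calneonLoop i cnum = cnum + calneonDigitSum n := by
  induction n using Nat.strong_induction_on with
  | _ n ih =>
    intro i cnum hn hi
    rw [calneonLoop]
    by_cases h : 0 < i
    · have h1 : PySem.Int.floordiv i 10 = i / 10 :=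
        PySem.Int.floordiv_eq_ediv_of_pos (by norm_num)
      have h2 : i / 10 < i := by omega
      have h3 : 0 ≤ i / 10 := by omega
      have hmod : PySem.Int.mod i 10 = i % 10 :=
        PySem.Int.mod_eq_emod_of_pos (by norm_num)
      rw [if_pos h, h1, hmod,
        ih (i / 10).toNat (by omega) (i / 10) _ rfl h3]
      have htn : (i / 10).toNat = n / 10 := by
        subst hn; omega
      have hm : i % 10 = ((n % 10 : Nat) : Int) := by
        subst hn; omega
      rw [htn, hm]
      conv_rhs => rw [calneonDigitSum, if_neg (show ¬ n = 0 by omega)]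
      ring
    · rw [if_neg h, calneonDigitSum, if_pos (by omega)]
      ring

-- toDigitsCore sum lemma
theorem calneon_toDigitsCore_sum (fuel : Nat) : ∀ (n : Nat) (ds : List Char), n < fuel →
    ((Nat.toDigitsCore 10 fuel n ds).map calneonCharVal).sum
      = calneonDigitSum n + ((ds.map calneonCharVal).sum) := by
  induction fuel with
  | zero => intro n ds h; omega
  | succ fuel ih =>
    intro n ds _
    rw [Nat.toDigitsCore]
    by_cases h : n / 10 = 0
    · simp only [h, if_pos]
      rw [List.map_cons, List.sum_cons,
        calneonCharVal_digitChar (n % 10) (by omega)]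
      rw [calneonDigitSum]
      by_cases h0 : n = 0
      · simp [h0]
      · conv_rhs => rw [calneonDigitSum, if_neg h0, h, calneonDigitSum, if_pos rfl]
        ring
    · rw [if_neg h, ih (n / 10) _ (by omega), List.map_cons, List.sum_cons,
        calneonCharVal_digitChar (n % 10) (by omega)]
      conv_rhs => rw [calneonDigitSum, if_neg (show ¬ n = 0 by omega)]
      ring

theorem calneon_toChars_sum (m : Int) (hm : 0 ≤ m) :
    ((PySem.Int.toChars m).map calneonCharVal).sum = calneonDigitSum m.toNat := by
  rw [PySem.Int.toChars, if_neg (by omega)]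
  rw [Nat.toDigits, calneon_toDigitsCore_sum (m.toNat + 1) m.toNat [] (by omega)]
  simp

-- ===== VERDICT (by name: the statement is the Claim_ definition above) =====
theorem calneon_spec : Claim_equal_calneon := by
  intro num _
  unfold Spec_calneon calneon calneon_alt
  have hsq : (0:Int) ≤ num ^ 2 := sq_nonneg num
  rw [calneon_toChars_sum (num ^ 2) hsq,
    calneonLoop_eq (num ^ 2).toNat (num ^ 2) 0 rfl hsq, zero_add]
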